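-- pv_equiv track=rewrite | github.com/alliance-genome/biocurator_mapper | app/go_parser.py | extract_synonyms_from_go_node
-- ===== SOURCE A (Python) =====
-- from typing import Dict, List
--
-- def extract_synonyms_from_go_node(node: Dict) -> Dict[str, List[str]]:
--     """Extract and categorize synonyms from GO node metadata."""
--     meta = node.get("meta", {})
--     synonyms = meta.get("synonyms", [])
--
--     exact_synonyms = []
--     narrow_synonyms = []
--     broad_synonyms = []
--     related_synonyms = []
--     all_synonyms = []
--
--     for syn in synonyms:
--         syn_text = syn.get("val", "")
--         syn_type = syn.get("pred", "")
--
--         if syn_text: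
--             all_synonyms.append(syn_text)
--
--             if syn_type == "hasExactSynonym":
--                 exact_synonyms.append(syn_text)
--             elif syn_type == "hasNarrowSynonym":
--                 narrow_synonyms.append(syn_text)
--             elif syn_type == "hasBroadSynonym":
--                 broad_synonyms.append(syn_text)
--             elif syn_type == "hasRelatedSynonym":
--                 related_synonyms.append(syn_text)
--
--     return {
--         "exact_synonyms": exact_synonyms,
--         "narrow_synonyms": narrow_synonyms,
--         "broad_synonyms": broad_synonyms,
--         "related_synonyms": related_synonyms,
--         "all_synonyms": all_synonyms
--     }
-- ===== SOURCE B (Python) =====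
-- def extract_synonyms_from_go_node(node):
--     """Extract and categorize synonyms from GO node metadata."""
--     synonyms = node.get("meta", {}).get("synonyms", [])
--     # one pass collecting (val, pred) pairs for non-empty vals,
--     # then each bucket is its own scan of that pair list
--     pairs = [(s.get("val", ""), s.get("pred", "")) for s in synonyms if s.get("val", "")]
--     return {
--         "exact_synonyms": [v for v, p in pairs if p == "hasExactSynonym"],
--         "narrow_synonyms": [v for v, p in pairs if p == "hasNarrowSynonym"],
--         "broad_synonyms": [v for v, p in pairs if p == "hasBroadSynonym"],
--         "related_synonyms": [v for v, p in pairs if p == "hasRelatedSynonym"],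
--         "all_synonyms": [v for v, p in pairs],
--     }
-- ===== Notes on version B (the rewrite author's own statement) =====
-- stated objective: alternative
-- what changed: Replaces A's single branching loop maintaining five accumulator lists with one collection pass building a filtered (val, pred) pair list followed by four independent filtering scans of that list, one per bucket.
import Mathlib
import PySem

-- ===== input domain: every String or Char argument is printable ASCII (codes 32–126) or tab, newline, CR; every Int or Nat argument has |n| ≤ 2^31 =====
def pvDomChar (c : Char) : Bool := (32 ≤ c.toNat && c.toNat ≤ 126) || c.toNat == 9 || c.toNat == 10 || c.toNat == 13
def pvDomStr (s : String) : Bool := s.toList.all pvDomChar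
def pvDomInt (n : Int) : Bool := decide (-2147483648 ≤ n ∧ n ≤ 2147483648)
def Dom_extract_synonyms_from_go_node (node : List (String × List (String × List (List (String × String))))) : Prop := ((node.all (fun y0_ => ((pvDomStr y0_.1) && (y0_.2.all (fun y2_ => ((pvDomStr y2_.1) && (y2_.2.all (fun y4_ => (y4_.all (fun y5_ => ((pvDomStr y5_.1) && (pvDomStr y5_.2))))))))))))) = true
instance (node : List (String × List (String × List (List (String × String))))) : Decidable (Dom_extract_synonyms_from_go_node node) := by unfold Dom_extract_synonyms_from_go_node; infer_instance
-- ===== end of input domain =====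

-- B builds a filtered (val, pred) pair list once and derives each bucket by its own
-- scan of that list, instead of A's single branching loop over five accumulators.


-- ===== PORT A =====
-- dict .get(k, default) on an association list = first-match lookup with default
def pvGetD {α : Type} (d : List (String × α)) (k : String) (dflt : α) : α :=
  (List.lookup k d).getD dflt

-- body of A's for-loop, verbatim (branches in A's order); named so the fold can be reasoned about
def pvAStep (st : List String × List String × List String × List String × List String)
    (syn : List (String × String)) :
    List String × List String × List String × List String × List String :=
  let syn_text := pvGetD syn "val" ""
  let syn_type := pvGetD syn "pred" ""
  if syn_text ≠ "" then
    match st with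
    | (e, n, b, r, a) =>
      let a' := a ++ [syn_text]
      if syn_type = "hasExactSynonym" then (e ++ [syn_text], n, b, r, a')
      else if syn_type = "hasNarrowSynonym" then (e, n ++ [syn_text], b, r, a')
      else if syn_type = "hasBroadSynonym" then (e, n, b ++ [syn_text], r, a')
      else if syn_type = "hasRelatedSynonym" then (e, n, b, r ++ [syn_text], a')
      else (e, n, b, r, a')
  else st

def extract_synonyms_from_go_node (node : List (String × List (String × List (List (String × String))))) : List (String × List String) :=
  let meta_ := pvGetD node "meta" []
  let synonyms := pvGetD meta_ "synonyms" []
  let st := synonyms.foldl pvAStep ([], [], [], [], [])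
  [("exact_synonyms", st.1), ("narrow_synonyms", st.2.1), ("broad_synonyms", st.2.2.1),
   ("related_synonyms", st.2.2.2.1), ("all_synonyms", st.2.2.2.2)]
-- ===== PORT B =====
def extract_synonyms_from_go_node_alt (node : List (String × List (String × List (List (String × String))))) : List (String × List String) :=
  let synonyms := pvGetD (pvGetD node "meta" []) "synonyms" []
  let pairs := (synonyms.filter (fun s => pvGetD s "val" "" ≠ "")).map
    (fun s => (pvGetD s "val" "", pvGetD s "pred" ""))
  [("exact_synonyms", (pairs.filter (fun vp => vp.2 = "hasExactSynonym")).map (·.1)),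
   ("narrow_synonyms", (pairs.filter (fun vp => vp.2 = "hasNarrowSynonym")).map (·.1)),
   ("broad_synonyms", (pairs.filter (fun vp => vp.2 = "hasBroadSynonym")).map (·.1)),
   ("related_synonyms", (pairs.filter (fun vp => vp.2 = "hasRelatedSynonym")).map (·.1)),
   ("all_synonyms", pairs.map (·.1))]

-- ===== PRECONDITION & SPEC =====
def Spec_extract_synonyms_from_go_node (node : List (String × List (String × List (List (String × String))))) (out : List (String × List String)) : Prop := out = extract_synonyms_from_go_node_alt node
instance (node : List (String × List (String × List (List (String × String))))) (out : List (String × List String)) : Decidable (Spec_extract_synonyms_from_go_node node out) := by unfold Spec_extract_synonyms_from_go_node; infer_instance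

-- ===== CLAIM (what is proved, stated in full; the proofs are below) =====
def Claim_equal_extract_synonyms_from_go_node : Prop := ∀ (node : List (String × List (String × List (List (String × String))))), Dom_extract_synonyms_from_go_node node → Spec_extract_synonyms_from_go_node node (extract_synonyms_from_go_node node)

-- ===== LEMMAS AND PROOFS =====
-- bucket of a pair list for a given predicate string
def pvBucket (pairs : List (String × String)) (p : String) : List String :=
  (pairs.filter (fun vp => vp.2 = p)).map (·.1)

def pvPairs (syns : List (List (String × String))) : List (String × String) :=
  (syns.filter (fun s => pvGetD s "val" "" ≠ "")).map
    (fun s => (pvGetD s "val" "", pvGetD s "pred" ""))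

theorem pvALoop_eq (syns : List (List (String × String)))
    (e n b r a : List String) :
    syns.foldl pvAStep (e, n, b, r, a) =
      (e ++ pvBucket (pvPairs syns) "hasExactSynonym",
       n ++ pvBucket (pvPairs syns) "hasNarrowSynonym",
       b ++ pvBucket (pvPairs syns) "hasBroadSynonym",
       r ++ pvBucket (pvPairs syns) "hasRelatedSynonym",
       a ++ (pvPairs syns).map (·.1)) := by
  induction syns generalizing e n b r a with
  | nil => simp [pvPairs, pvBucket]
  | cons s rest ih =>
    rw [List.foldl_cons]
    by_cases hv : pvGetD s "val" "" = ""
    · rw [show pvAStep (e, n, b, r, a) s = (e, n, b, r, a) by simp [pvAStep, hv]]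
      rw [ih]
      simp [pvPairs, pvBucket, hv]
    · by_cases h1 : pvGetD s "pred" "" = "hasExactSynonym"
      · rw [show pvAStep (e, n, b, r, a) s
              = (e ++ [pvGetD s "val" ""], n, b, r, a ++ [pvGetD s "val" ""]) by
            simp [pvAStep, hv, h1]]
        rw [ih]
        simp [pvPairs, pvBucket, hv, h1]
      · by_cases h2 : pvGetD s "pred" "" = "hasNarrowSynonym"
        · rw [show pvAStep (e, n, b, r, a) s
                = (e, n ++ [pvGetD s "val" ""], b, r, a ++ [pvGetD s "val" ""]) by
              simp [pvAStep, hv, h2]]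
          rw [ih]
          simp [pvPairs, pvBucket, hv, h2]
        · by_cases h3 : pvGetD s "pred" "" = "hasBroadSynonym"
          · rw [show pvAStep (e, n, b, r, a) s
                  = (e, n, b ++ [pvGetD s "val" ""], r, a ++ [pvGetD s "val" ""]) by
                simp [pvAStep, hv, h3]]
            rw [ih]
            simp [pvPairs, pvBucket, hv, h3]
          · by_cases h4 : pvGetD s "pred" "" = "hasRelatedSynonym"
            · rw [show pvAStep (e, n, b, r, a) s
                    = (e, n, b, r ++ [pvGetD s "val" ""], a ++ [pvGetD s "val" ""]) by
                  simp [pvAStep, hv, h4]]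
              rw [ih]
              simp [pvPairs, pvBucket, hv, h4]
            · rw [show pvAStep (e, n, b, r, a) s
                    = (e, n, b, r, a ++ [pvGetD s "val" ""]) by
                  simp [pvAStep, hv, h1, h2, h3, h4]]
              rw [ih]
              simp [pvPairs, pvBucket, hv, h1, h2, h3, h4]

-- ===== VERDICT (by name: the statement is the Claim_ definition above) =====
theorem extract_synonyms_from_go_node_spec : Claim_equal_extract_synonyms_from_go_node := by
  intro node _
  show _ = _
  simp only [extract_synonyms_from_go_node, extract_synonyms_from_go_node_alt, pvALoop_eq]
  simp [pvBucket, pvPairs]
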